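-- pv_equiv track=rewrite | github.com/AkshatP07/DocuMind-AI-docker | server/services/enhanced_extractor.py | has_corrupted_text
-- ===== SOURCE A (Python) =====
-- def has_corrupted_text(text: str) -> bool:
--     words = text.split()
--     if len(words) < 4: return False
--     for i in range(len(words) - 3):
--         if words[i:i+2] == words[i+2:i+4]:
--             return True
--     for i in range(len(words) - 1):
--         if len(words[i]) > 5 and words[i].endswith(words[i+1]):
--             return True
--     return False
-- ===== SOURCE B (Python) =====
-- def has_corrupted_text(text: str) -> bool:
--     words = text.split()
--     if len(words) < 4:
--         return False
--     # explicit stack of the remaining suffix (kept reversed so pop() is O(1));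
--     # elements are destructured and compared pointwise -- no index ranges, no slices
--     stack = words[::-1]
--     while len(stack) >= 2:
--         a = stack.pop()
--         if len(a) > 5 and a.endswith(stack[-1]):
--             return True
--         if len(stack) >= 3 and a == stack[-2] and stack[-1] == stack[-3]:
--             return True
--     return False
-- ===== Notes on version B (the rewrite author's own statement) =====
-- stated objective: alternative
-- what changed: Replaces A's two index-range scans with slice comparisons by a single explicit-stack traversal over word-list suffixes (the list kept reversed so pop() is O(1)) that destructures neighbouring words and compares them pointwise.
import Mathlib
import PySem

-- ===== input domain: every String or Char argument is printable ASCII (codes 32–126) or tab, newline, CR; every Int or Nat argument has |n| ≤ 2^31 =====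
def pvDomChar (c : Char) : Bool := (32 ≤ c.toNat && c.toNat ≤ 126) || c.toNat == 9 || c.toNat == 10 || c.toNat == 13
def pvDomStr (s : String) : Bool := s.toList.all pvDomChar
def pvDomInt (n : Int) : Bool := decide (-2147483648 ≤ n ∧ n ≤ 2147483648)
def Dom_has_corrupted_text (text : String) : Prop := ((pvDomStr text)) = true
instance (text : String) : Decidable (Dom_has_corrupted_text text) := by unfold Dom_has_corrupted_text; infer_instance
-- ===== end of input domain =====

-- B replaces A's two index-range scans by one explicit-stack traversal of the word-list
-- suffixes with pointwise comparisons (objective: alternative decomposition, same cost).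

-- ===== PORT A =====
-- A: early guard, then a scan for duplicated adjacent word pairs (slice comparison),
-- then a scan for long-word suffix repetition.
def has_corrupted_text (text : String) : Bool :=
  let words := PySem.Str.split₀ text
  if words.length < 4 then false
  else if (PySem.List.pyRange 0 ((words.length : Int) - 3) 1).any (fun i =>
      decide (PySem.List.slice words (some i) (some (i + 2)) =
              PySem.List.slice words (some (i + 2)) (some (i + 4)))) then true
  else if (PySem.List.pyRange 0 ((words.length : Int) - 1) 1).any (fun i =>
      decide (5 < PySem.Str.len (PySem.List.pyGetD words i "")) &&
      PySem.Str.endswith (PySem.List.pyGetD words i "") (PySem.List.pyGetD words (i + 1) "")) then true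
  else false

-- ===== PORT B =====
-- B's while-loop pops the top of the reversed stack and looks at the next three entries below it.
-- Port: the stack's content, read top-down, is the remaining suffix of `words`; we carry that
-- suffix as a list whose HEAD is the stack top (`stack.pop()` = take the head); each iteration
-- destructures the top two words, tests the two pointwise predicates, and recurses on the tail.
def pvScanB : List String → Bool
  | a :: rest =>
    (match rest with
     | [] => false
     | b :: rest' =>
       if decide (5 < PySem.Str.len a) && PySem.Str.endswith a b then true
       else if (match rest' with
                | c :: d :: _ => decide (a = c) && decide (b = d)
                | _ => false) then true
       else pvScanB rest)
  | [] => false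

def has_corrupted_text_alt (text : String) : Bool :=
  let words := PySem.Str.split₀ text
  if words.length < 4 then false
  else pvScanB words

-- ===== PRECONDITION & SPEC =====
def Spec_has_corrupted_text (text : String) (out : Bool) : Prop := out = has_corrupted_text_alt text
instance (text : String) (out : Bool) : Decidable (Spec_has_corrupted_text text out) := by unfold Spec_has_corrupted_text; infer_instance

-- ===== CLAIM (what is proved, stated in full; the proofs are below) =====
def Claim_equal_has_corrupted_text : Prop := ∀ (text : String), Dom_has_corrupted_text text → Spec_has_corrupted_text text (has_corrupted_text text)

-- ===== LEMMAS AND PROOFS =====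

-- index-based predicates shared by both characterisations
def pvSuffP (ws : List String) (i : Nat) : Prop :=
  5 < PySem.Str.len (ws.getD i "") ∧
  PySem.Str.endswith (ws.getD i "") (ws.getD (i + 1) "") = true

def pvPairP (ws : List String) (i : Nat) : Prop :=
  ws.getD i "" = ws.getD (i + 2) "" ∧ ws.getD (i + 1) "" = ws.getD (i + 3) ""

-- B's stack loop finds exactly the positions satisfying one of the two predicates
theorem pvScanB_iff (ws : List String) :
    pvScanB ws = true ↔
      ∃ i : Nat, (i + 2 ≤ ws.length ∧ pvSuffP ws i) ∨ (i + 4 ≤ ws.length ∧ pvPairP ws i) := by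
  induction ws with
  | nil => simp [pvScanB]
  | cons a rest ih =>
    cases rest with
    | nil =>
      simp only [pvScanB]
      constructor
      · intro h; cases h
      · rintro ⟨i, h | h⟩ <;> simp at h
    | cons b rest' =>
      simp only [pvScanB]
      constructor
      · intro h
        split_ifs at h with h1 h2
        · refine ⟨0, Or.inl ⟨by simp only [List.length_cons]; omega, ?_⟩⟩
          simp only [Bool.and_eq_true, decide_eq_true_eq] at h1
          simpa [pvSuffP] using h1
        · refine ⟨0, Or.inr ?_⟩
          match rest', h2 with
          | c :: d :: _, h2 =>
            simp only [Bool.and_eq_true, decide_eq_true_eq] at h2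
            exact ⟨by simp only [List.length_cons]; omega, by simpa [pvPairP] using h2⟩
        · rcases ih.mp h with ⟨i, hi | hi⟩
          · exact ⟨i + 1, Or.inl ⟨by simp at hi ⊢; omega, by simpa [pvSuffP] using hi.2⟩⟩
          · exact ⟨i + 1, Or.inr ⟨by simp at hi ⊢; omega, by simpa [pvPairP] using hi.2⟩⟩
      · rintro ⟨i, hi | hi⟩
        · cases i with
          | zero =>
            rcases hi with ⟨_, hs⟩
            simp only [pvSuffP, List.getD_cons_zero, List.getD_cons_succ] at hs
            have h1 : (decide (5 < PySem.Str.len a) && PySem.Str.endswith a b) = true := by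
              rw [Bool.and_eq_true, decide_eq_true_eq]; exact ⟨hs.1, hs.2⟩
            rw [if_pos h1]
          | succ j =>
            split_ifs with h1 h2
            · rfl
            · rfl
            · exact ih.mpr ⟨j, Or.inl ⟨by simp at hi ⊢; omega,
                by simpa [pvSuffP] using hi.2⟩⟩
        · cases i with
          | zero =>
            rcases hi with ⟨hlen, hp⟩
            split_ifs with h1 h2
            · rfl
            · rfl
            · exfalso
              simp only [List.length_cons] at hlen
              match rest', hlen with
              | c :: d :: _, _ =>
                simp only [pvPairP, List.getD_cons_zero, List.getD_cons_succ] at hp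
                simp [hp.1, hp.2] at h2
          | succ j =>
            split_ifs with h1 h2
            · rfl
            · rfl
            · exact ih.mpr ⟨j, Or.inr ⟨by simp at hi ⊢; omega,
                by simpa [pvPairP] using hi.2⟩⟩

-- two consecutive elements as an explicit slice
theorem pvTakeTwo (ws : List String) (k : Nat) (h : k + 2 ≤ ws.length) :
    (ws.drop k).take 2 = [ws.getD k "", ws.getD (k + 1) ""] := by
  have h1 : k < ws.length := by omega
  have h2 : k + 1 < ws.length := by omega
  rw [List.getD_eq_getElem _ _ h1, List.getD_eq_getElem _ _ h2,
      List.drop_eq_getElem_cons h1, List.drop_eq_getElem_cons h2]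
  simp only [List.take_succ_cons, List.take_zero]

-- A's pair scan finds exactly the positions satisfying pvPairP
theorem pvAnyPair_iff (ws : List String) :
    ((PySem.List.pyRange 0 ((ws.length : Int) - 3) 1).any (fun i =>
      decide (PySem.List.slice ws (some i) (some (i + 2)) =
              PySem.List.slice ws (some (i + 2)) (some (i + 4))))) = true ↔
      ∃ i : Nat, i + 4 ≤ ws.length ∧ pvPairP ws i := by
  rw [List.any_eq_true]
  constructor
  · rintro ⟨i, hi, hp⟩
    rw [PySem.List.mem_pyRange_one] at hi
    obtain ⟨k, rfl⟩ : ∃ k : Nat, i = (k : Int) := ⟨i.toNat, by omega⟩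
    have hk : k + 4 ≤ ws.length := by omega
    refine ⟨k, hk, ?_⟩
    simp only [decide_eq_true_eq] at hp
    rw [show ((k : Int) + 2) = ((k + 2 : Nat) : Int) by push_cast; ring,
        show ((k : Int) + 4) = ((k + 2 + 2 : Nat) : Int) by push_cast; ring] at hp
    rw [PySem.List.slice_natCast, PySem.List.slice_natCast] at hp
    simp only [show k + 2 - k = 2 by omega, show k + 2 + 2 - (k+2) = 2 by omega] at hp
    rw [pvTakeTwo ws k (by omega), pvTakeTwo ws (k + 2) (by omega)] at hp
    simp only [List.cons.injEq, and_true] at hp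
    have h2 := hp.2
    rw [show k + 2 + 1 = k + 3 from by omega] at h2
    exact ⟨hp.1, h2⟩
  · rintro ⟨k, hk, hp⟩
    refine ⟨(k : Int), by rw [PySem.List.mem_pyRange_one]; omega, ?_⟩
    simp only [decide_eq_true_eq]
    rw [show ((k : Int) + 2) = ((k + 2 : Nat) : Int) by push_cast; ring,
        show ((k : Int) + 4) = ((k + 2 + 2 : Nat) : Int) by push_cast; ring]
    rw [PySem.List.slice_natCast, PySem.List.slice_natCast]
    simp only [show k + 2 - k = 2 by omega, show k + 2 + 2 - (k+2) = 2 by omega]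
    rw [pvTakeTwo ws k (by omega), pvTakeTwo ws (k + 2) (by omega)]
    simp only [List.cons.injEq, and_true]
    have h2 := hp.2
    rw [show k + 3 = k + 2 + 1 from by omega] at h2
    exact ⟨hp.1, h2⟩

-- A's suffix scan finds exactly the positions satisfying pvSuffP
theorem pvAnySuff_iff (ws : List String) :
    ((PySem.List.pyRange 0 ((ws.length : Int) - 1) 1).any (fun i =>
      decide (5 < PySem.Str.len (PySem.List.pyGetD ws i "")) &&
      PySem.Str.endswith (PySem.List.pyGetD ws i "") (PySem.List.pyGetD ws (i + 1) ""))) = true ↔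
      ∃ i : Nat, i + 2 ≤ ws.length ∧ pvSuffP ws i := by
  rw [List.any_eq_true]
  constructor
  · rintro ⟨i, hi, hp⟩
    rw [PySem.List.mem_pyRange_one] at hi
    obtain ⟨k, rfl⟩ : ∃ k : Nat, i = (k : Int) := ⟨i.toNat, by omega⟩
    refine ⟨k, by omega, ?_⟩
    rw [show ((k : Int) + 1) = ((k + 1 : Nat) : Int) by push_cast; ring] at hp
    simp only [PySem.List.pyGetD_natCast, Bool.and_eq_true, decide_eq_true_eq] at hp
    exact hp
  · rintro ⟨k, hk, hp⟩
    refine ⟨(k : Int), by rw [PySem.List.mem_pyRange_one]; omega, ?_⟩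
    rw [show ((k : Int) + 1) = ((k + 1 : Nat) : Int) by push_cast; ring]
    simp only [PySem.List.pyGetD_natCast, Bool.and_eq_true, decide_eq_true_eq]
    exact hp

-- ===== VERDICT (by name: the statement is the Claim_ definition above) =====
theorem has_corrupted_text_spec : Claim_equal_has_corrupted_text := by
  intro text _
  unfold Spec_has_corrupted_text has_corrupted_text has_corrupted_text_alt
  dsimp only
  set ws := PySem.Str.split₀ text with hws
  by_cases h : ws.length < 4
  · rw [if_pos h, if_pos h]
  · rw [if_neg h, if_neg h]
    by_cases hp : ((PySem.List.pyRange 0 ((ws.length : Int) - 3) 1).any (fun i =>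
        decide (PySem.List.slice ws (some i) (some (i + 2)) =
                PySem.List.slice ws (some (i + 2)) (some (i + 4))))) = true
    · rw [if_pos hp]
      rcases (pvAnyPair_iff ws).mp hp with ⟨i, hi, hpp⟩
      exact ((pvScanB_iff ws).mpr ⟨i, Or.inr ⟨hi, hpp⟩⟩).symm
    · rw [if_neg hp]
      by_cases hs : ((PySem.List.pyRange 0 ((ws.length : Int) - 1) 1).any (fun i =>
          decide (5 < PySem.Str.len (PySem.List.pyGetD ws i "")) &&
          PySem.Str.endswith (PySem.List.pyGetD ws i "") (PySem.List.pyGetD ws (i + 1) ""))) = true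
      · rw [if_pos hs]
        rcases (pvAnySuff_iff ws).mp hs with ⟨i, hi, hsp⟩
        exact ((pvScanB_iff ws).mpr ⟨i, Or.inl ⟨hi, hsp⟩⟩).symm
      · rw [if_neg hs]
        rcases hb : pvScanB ws with _ | _
        · rfl
        · rcases (pvScanB_iff ws).mp hb with ⟨i, hii | hii⟩
          · exact absurd ((pvAnySuff_iff ws).mpr ⟨i, hii⟩) hs
          · exact absurd ((pvAnyPair_iff ws).mpr ⟨i, hii⟩) hp
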